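-- pv_equiv track=rewrite | github.com/Kenan3477/Sales-Form | asis_true_self_modification.py | _requires_specialization
-- ===== SOURCE A (Python) =====
-- from typing import Dict, List, Any, Optional, Tuple
--
-- def _requires_specialization(analysis_result: Dict[str, Any], specialization: str) -> bool:
--     """Check if analysis result requires specific specialization"""
--     if specialization == "performance_optimizer":
--         return any(b["type"] in ["nested_loops", "string_concatenation_in_loop"]
--                   for b in analysis_result.get("bottlenecks", []))
--     elif specialization == "async_specialist":
--         return any(b["type"] == "blocking_call"
--                   for b in analysis_result.get("bottlenecks", []))
--     elif specialization == "implementation_specialist":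
--         return any(g["type"] == "empty_function"
--                   for g in analysis_result.get("gaps", []))
--     elif specialization == "code_completion_specialist":
--         return any(g["type"] == "todo_comment"
--                   for g in analysis_result.get("gaps", []))
--     return False
-- ===== SOURCE B (Python) =====
-- def _requires_specialization(analysis_result, specialization):
--     # Inverted strategy: scan the analysis data once, classifying each finding into
--     # the specialization it triggers, then answer by membership in that set.
--     triggered = set()
--     for b in analysis_result.get("bottlenecks", []):
--         t = b.get("type")
--         if t in ("nested_loops", "string_concatenation_in_loop"):
--             triggered.add("performance_optimizer")
--         elif t == "blocking_call":
--             triggered.add("async_specialist")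
--     for g in analysis_result.get("gaps", []):
--         t = g.get("type")
--         if t == "empty_function":
--             triggered.add("implementation_specialist")
--         elif t == "todo_comment":
--             triggered.add("code_completion_specialist")
--     return specialization in triggered
-- ===== Notes on version B (the rewrite author's own statement) =====
-- stated objective: alternative
-- what changed: Inverts the control flow: instead of dispatching on the specialization and scanning one field for it, B classifies every finding in the data into the set of specializations it triggers (one pass over bottlenecks and gaps with an accumulator set) and answers by membership of the queried specialization in that set.
import Mathlib
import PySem

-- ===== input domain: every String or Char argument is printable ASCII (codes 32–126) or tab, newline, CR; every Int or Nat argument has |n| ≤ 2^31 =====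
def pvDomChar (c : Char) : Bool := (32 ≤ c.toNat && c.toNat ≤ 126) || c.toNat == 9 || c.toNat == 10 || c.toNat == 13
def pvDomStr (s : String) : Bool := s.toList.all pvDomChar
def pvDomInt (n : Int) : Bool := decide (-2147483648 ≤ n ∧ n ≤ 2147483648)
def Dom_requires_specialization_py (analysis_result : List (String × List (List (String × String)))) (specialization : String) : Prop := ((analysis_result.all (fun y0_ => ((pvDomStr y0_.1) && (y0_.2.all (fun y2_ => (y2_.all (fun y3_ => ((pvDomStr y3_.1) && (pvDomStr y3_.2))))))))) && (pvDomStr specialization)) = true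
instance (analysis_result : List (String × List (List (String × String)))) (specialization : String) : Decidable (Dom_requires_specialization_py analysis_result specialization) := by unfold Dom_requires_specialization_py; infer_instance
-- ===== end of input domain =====

-- B inverts the control flow: it classifies every finding into the specialization it triggers
-- (one accumulator-set pass over the data) and answers by membership (objective: alternative).
-- Return-value equivalence only; neither program mutates its arguments.

-- ===== PORT A =====
-- Literal port of the if/elif cascade.  analysis_result.get(field, []) is first-match
-- association-list lookup with default []; b["type"] is first-match lookup, whose KeyError
-- (missing "type") is excluded by Pre_ below, so the .getD "" default is never reached there.
def requires_specialization_py (analysis_result : List (String × List (List (String × String)))) (specialization : String) : Bool :=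
  if specialization == "performance_optimizer" then
    ((List.lookup "bottlenecks" analysis_result).getD []).any
      (fun b => ["nested_loops", "string_concatenation_in_loop"].contains ((List.lookup "type" b).getD ""))
  else if specialization == "async_specialist" then
    ((List.lookup "bottlenecks" analysis_result).getD []).any
      (fun b => ((List.lookup "type" b).getD "") == "blocking_call")
  else if specialization == "implementation_specialist" then
    ((List.lookup "gaps" analysis_result).getD []).any
      (fun g => ((List.lookup "type" g).getD "") == "empty_function")
  else if specialization == "code_completion_specialist" then
    ((List.lookup "gaps" analysis_result).getD []).any
      (fun g => ((List.lookup "type" g).getD "") == "todo_comment")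
  else false

-- ===== PORT B =====
-- One loop body per field: item.get("type") is an Option lookup (None never matches a target).
def pvStepBottleneck (acc : PySem.Set String) (b : List (String × String)) : PySem.Set String :=
  let t := List.lookup "type" b
  if t == some "nested_loops" || t == some "string_concatenation_in_loop" then
    PySem.Set.add acc "performance_optimizer"
  else if t == some "blocking_call" then PySem.Set.add acc "async_specialist"
  else acc

def pvStepGap (acc : PySem.Set String) (g : List (String × String)) : PySem.Set String :=
  let t := List.lookup "type" g
  if t == some "empty_function" then PySem.Set.add acc "implementation_specialist"
  else if t == some "todo_comment" then PySem.Set.add acc "code_completion_specialist"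
  else acc

def requires_specialization_py_alt (analysis_result : List (String × List (List (String × String)))) (specialization : String) : Bool :=
  let triggered : PySem.Set String := PySem.Set.empty
  let triggered := ((List.lookup "bottlenecks" analysis_result).getD []).foldl pvStepBottleneck triggered
  let triggered := ((List.lookup "gaps" analysis_result).getD []).foldl pvStepGap triggered
  PySem.Set.contains triggered specialization

-- ===== PRECONDITION & SPEC =====
-- Pre_ excludes inputs where, in the field the given specialization consults, some item dict
-- lacks the key "type": there A's item["type"] raises KeyError.  Stated over the whole consulted
-- list (not only up to the first match), slightly wider than A's lazy raising.
def Pre_requires_specialization_py (analysis_result : List (String × List (List (String × String)))) (specialization : String) : Prop :=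
  ((specialization = "performance_optimizer" ∨ specialization = "async_specialist") →
     ∀ item ∈ (List.lookup "bottlenecks" analysis_result).getD [], (List.lookup "type" item).isSome) ∧
  ((specialization = "implementation_specialist" ∨ specialization = "code_completion_specialist") →
     ∀ item ∈ (List.lookup "gaps" analysis_result).getD [], (List.lookup "type" item).isSome)
instance (analysis_result : List (String × List (List (String × String)))) (specialization : String) : Decidable (Pre_requires_specialization_py analysis_result specialization) := by unfold Pre_requires_specialization_py; infer_instance

def pvWitness_requires_specialization_py : (List (String × List (List (String × String)))) × String :=
  ([("bottlenecks", [[("type", "nested_loops")]])], "performance_optimizer")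

def Spec_requires_specialization_py (analysis_result : List (String × List (List (String × String)))) (specialization : String) (out : Bool) : Prop := out = requires_specialization_py_alt analysis_result specialization
instance (analysis_result : List (String × List (List (String × String)))) (specialization : String) (out : Bool) : Decidable (Spec_requires_specialization_py analysis_result specialization out) := by unfold Spec_requires_specialization_py; infer_instance

-- ===== CLAIM =====
def Claim_equal_requires_specialization_py : Prop := ∀ (analysis_result : List (String × List (List (String × String)))) (specialization : String), Dom_requires_specialization_py analysis_result specialization → Pre_requires_specialization_py analysis_result specialization → Spec_requires_specialization_py analysis_result specialization (requires_specialization_py analysis_result specialization)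

-- ===== LEMMAS AND PROOFS =====

-- The specialization (if any) a single finding triggers.
def pvTrigB (b : List (String × String)) : Option String :=
  let t := List.lookup "type" b
  if t == some "nested_loops" || t == some "string_concatenation_in_loop" then
    some "performance_optimizer"
  else if t == some "blocking_call" then some "async_specialist"
  else none

def pvTrigG (g : List (String × String)) : Option String :=
  let t := List.lookup "type" g
  if t == some "empty_function" then some "implementation_specialist"
  else if t == some "todo_comment" then some "code_completion_specialist"
  else none

theorem pv_contains_add (s : PySem.Set String) (x y : String) :
    PySem.Set.contains (PySem.Set.add s x) y = (PySem.Set.contains s y || y == x) := by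
  rw [Bool.eq_iff_iff]
  simp [PySem.Set.mem_add, beq_iff_eq]

theorem pv_contains_stepB (acc : PySem.Set String) (b : List (String × String)) (s : String) :
    PySem.Set.contains (pvStepBottleneck acc b) s
      = (PySem.Set.contains acc s || pvTrigB b == some s) := by
  unfold pvStepBottleneck pvTrigB
  dsimp only
  split_ifs <;> simp [pv_contains_add, beq_eq_decide, eq_comm]

theorem pv_contains_stepG (acc : PySem.Set String) (g : List (String × String)) (s : String) :
    PySem.Set.contains (pvStepGap acc g) s
      = (PySem.Set.contains acc s || pvTrigG g == some s) := by
  unfold pvStepGap pvTrigG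
  dsimp only
  split_ifs <;> simp [pv_contains_add, beq_eq_decide, eq_comm]

theorem pv_contains_foldB (l : List (List (String × String))) (acc : PySem.Set String) (s : String) :
    PySem.Set.contains (l.foldl pvStepBottleneck acc) s
      = (PySem.Set.contains acc s || l.any (fun b => pvTrigB b == some s)) := by
  induction l generalizing acc with
  | nil => simp
  | cons b l ih =>
    rw [List.foldl_cons, ih, pv_contains_stepB, List.any_cons, Bool.or_assoc]

theorem pv_contains_foldG (l : List (List (String × String))) (acc : PySem.Set String) (s : String) :
    PySem.Set.contains (l.foldl pvStepGap acc) s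
      = (PySem.Set.contains acc s || l.any (fun g => pvTrigG g == some s)) := by
  induction l generalizing acc with
  | nil => simp
  | cons g l ih =>
    rw [List.foldl_cons, ih, pv_contains_stepG, List.any_cons, Bool.or_assoc]

-- B's answer as two any-scans over the classified findings.
theorem pv_alt_eq (ar : List (String × List (List (String × String)))) (s : String) :
    requires_specialization_py_alt ar s
      = (((List.lookup "bottlenecks" ar).getD []).any (fun b => pvTrigB b == some s)
         || ((List.lookup "gaps" ar).getD []).any (fun g => pvTrigG g == some s)) := by
  unfold requires_specialization_py_alt
  dsimp only
  rw [pv_contains_foldG, pv_contains_foldB]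
  simp [PySem.Set.empty, PySem.Set.contains]

-- Pointwise bridges between a classified finding and A's per-case predicates.
theorem pv_trigB_perf (b : List (String × String)) :
    (pvTrigB b == some "performance_optimizer")
      = ["nested_loops", "string_concatenation_in_loop"].contains ((List.lookup "type" b).getD "") := by
  unfold pvTrigB; dsimp only
  cases ht : List.lookup "type" b with
  | none => simp
  | some v =>
    by_cases hA : v = "nested_loops" ∨ v = "string_concatenation_in_loop"
    · rcases hA with rfl | rfl <;> simp
    · push_neg at hA
      by_cases hB : v = "blocking_call"
      · subst hB; simp
      · simp [beq_eq_decide, hA.1, hA.2, hB]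
theorem pv_trigB_async (b : List (String × String)) :
    (pvTrigB b == some "async_specialist")
      = (((List.lookup "type" b).getD "") == "blocking_call") := by
  unfold pvTrigB; dsimp only
  cases ht : List.lookup "type" b with
  | none => simp
  | some v =>
    by_cases hA : v = "nested_loops" ∨ v = "string_concatenation_in_loop"
    · rcases hA with rfl | rfl <;> simp
    · push_neg at hA
      by_cases hB : v = "blocking_call"
      · subst hB; simp
      · simp [beq_eq_decide, hA.1, hA.2, hB]
theorem pv_trigG_impl (g : List (String × String)) :
    (pvTrigG g == some "implementation_specialist")
      = (((List.lookup "type" g).getD "") == "empty_function") := by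
  unfold pvTrigG; dsimp only
  cases ht : List.lookup "type" g with
  | none => simp
  | some v =>
    by_cases hA : v = "empty_function"
    · subst hA; simp
    · by_cases hB : v = "todo_comment"
      · subst hB; simp
      · simp [beq_eq_decide, hA, hB]
theorem pv_trigG_todo (g : List (String × String)) :
    (pvTrigG g == some "code_completion_specialist")
      = (((List.lookup "type" g).getD "") == "todo_comment") := by
  unfold pvTrigG; dsimp only
  cases ht : List.lookup "type" g with
  | none => simp
  | some v =>
    by_cases hA : v = "empty_function"
    · subst hA; simp
    · by_cases hB : v = "todo_comment"
      · subst hB; simp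
      · simp [beq_eq_decide, hA, hB]
theorem pv_trigB_other (b : List (String × String)) (s : String)
    (h1 : s ≠ "performance_optimizer") (h2 : s ≠ "async_specialist") :
    (pvTrigB b == some s) = false := by
  unfold pvTrigB; dsimp only
  split_ifs <;> simp [beq_iff_eq] <;> intro h <;> [exact h1 h.symm; exact h2 h.symm]
theorem pv_trigG_other (g : List (String × String)) (s : String)
    (h3 : s ≠ "implementation_specialist") (h4 : s ≠ "code_completion_specialist") :
    (pvTrigG g == some s) = false := by
  unfold pvTrigG; dsimp only
  split_ifs <;> simp [beq_iff_eq] <;> intro h <;> [exact h3 h.symm; exact h4 h.symm]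

-- ===== VERDICT =====
theorem requires_specialization_py_spec : Claim_equal_requires_specialization_py := by
  intro ar s _ _
  unfold Spec_requires_specialization_py
  rw [pv_alt_eq]
  unfold requires_specialization_py
  by_cases h1 : s = "performance_optimizer"
  · subst h1
    have hg : ∀ g : List (String × String), (pvTrigG g == some "performance_optimizer") = false :=
      fun g => pv_trigG_other g _ (by decide) (by decide)
    simp only [pv_trigB_perf, hg]
    simp
  · by_cases h2 : s = "async_specialist"
    · subst h2
      have hg : ∀ g : List (String × String), (pvTrigG g == some "async_specialist") = false :=
        fun g => pv_trigG_other g _ (by decide) (by decide)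
      simp only [pv_trigB_async, hg]
      simp [beq_eq_decide, h1]
    · by_cases h3 : s = "implementation_specialist"
      · subst h3
        have hb : ∀ b : List (String × String), (pvTrigB b == some "implementation_specialist") = false :=
          fun b => pv_trigB_other b _ (by decide) (by decide)
        simp only [pv_trigG_impl, hb]
        simp [beq_eq_decide, h1, h2]
      · by_cases h4 : s = "code_completion_specialist"
        · subst h4
          have hb : ∀ b : List (String × String), (pvTrigB b == some "code_completion_specialist") = false :=
            fun b => pv_trigB_other b _ (by decide) (by decide)
          simp only [pv_trigG_todo, hb]
          simp [beq_eq_decide, h1, h2, h3]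
        · have hb : ∀ b : List (String × String), (pvTrigB b == some s) = false :=
            fun b => pv_trigB_other b s h1 h2
          have hg : ∀ g : List (String × String), (pvTrigG g == some s) = false :=
            fun g => pv_trigG_other g s h3 h4
          simp only [hb, hg]
          simp [beq_eq_decide, h1, h2, h3, h4]
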